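-- pv_equiv track=rewrite | github.com/cybercongress/launch-kit | lifetime_rewards_tool/data/notebook/converter.py | convert
-- ===== SOURCE A (Python) =====
-- def convert (data, inBits, outBits, pad):
--     value = 0
--     bits = 0
--     maxV = (1 << outBits) - 1
--
--     result = []
--     for i in range(len(data)):
--         value = (value << inBits) | data[i]
--         bits += inBits
--
--         while (bits >= outBits):
--             bits -= outBits
--             result.append((value >> bits) & maxV)
--
--     if (pad):
--         if (bits > 0):
--             result.append((value << (outBits - bits)) & maxV)
--     else:
--         if (bits >= inBits):
--             raise Error('Excess padding')
--         if ((value << (outBits - bits)) & maxV):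
--             raise Error('Non-zero padding')
--
--     return result
-- ===== SOURCE B (Python) =====
-- class Error(Exception):
--     pass
--
-- def convert(data, inBits, outBits, pad):
--     # Two-pass decomposition: build all running prefix values first, then
--     # extract every output chunk by closed-form index/shift arithmetic.
--     prefixes = []
--     value = 0
--     for d in data:
--         value = (value << inBits) | d
--         prefixes.append(value)
--     total = len(data) * inBits
--     n = total // outBits                # number of full output chunks
--     maxV = (1 << outBits) - 1
--     result = []
--     for j in range(n):
--         i = -(-((j + 1) * outBits) // inBits) - 1   # first element whose prefix holds chunk j
--         result.append((prefixes[i] >> ((i + 1) * inBits - (j + 1) * outBits)) & maxV)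
--     r = total % outBits                 # bits left over after the full chunks
--     if pad:
--         if r > 0:
--             result.append((value << (outBits - r)) & maxV)
--     else:
--         if r >= inBits:
--             raise Error('Excess padding')
--         if (value << (outBits - r)) & maxV:
--             raise Error('Non-zero padding')
--     return result
-- ===== Notes on version B (the rewrite author's own statement) =====
-- stated objective: alternative
-- what changed: A interleaves accumulation with an inner while-loop that emits chunks as bits pile up; B is a two-pass build-then-index decomposition: it first records every running prefix value, then computes the chunk count, each chunk's source prefix index and its shift by closed-form floor/ceiling-division arithmetic, and the leftover bit count as a modulus instead of loop state.
-- outside the precondition, e.g. on convert([], 3, 0, True): A returns [], B raises ZeroDivisionError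
import Mathlib
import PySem

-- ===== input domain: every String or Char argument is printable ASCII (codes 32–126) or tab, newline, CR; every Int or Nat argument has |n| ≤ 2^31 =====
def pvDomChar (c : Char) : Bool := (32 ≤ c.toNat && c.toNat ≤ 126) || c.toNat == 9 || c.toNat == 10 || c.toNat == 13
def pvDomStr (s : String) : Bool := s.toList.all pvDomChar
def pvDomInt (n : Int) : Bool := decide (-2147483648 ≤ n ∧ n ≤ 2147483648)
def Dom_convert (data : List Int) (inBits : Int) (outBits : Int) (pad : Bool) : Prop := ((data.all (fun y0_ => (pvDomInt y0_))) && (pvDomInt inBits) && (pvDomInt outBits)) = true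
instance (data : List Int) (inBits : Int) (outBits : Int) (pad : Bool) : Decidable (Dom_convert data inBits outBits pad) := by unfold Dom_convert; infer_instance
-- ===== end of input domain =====

-- B replaces A's interleaved accumulate-and-emit while-loop by a two-pass build-then-index
-- decomposition (all prefix values first, then closed-form chunk index/shift arithmetic); objective: alternative.


-- ===== PORT A =====
-- A's inner loop 'while (bits >= outBits): bits -= outBits; result.append((value >> bits) & maxV)'.
-- Fuel-bounded recursion: with 1 ≤ outBits (Pre_) each iteration decreases bits by at least 1,
-- so fuel = bits.toNat at the call site always suffices.
def convertWhile (value : Int) (outB : Int) (maxV : Int) : Nat → Int → List Int → Int × List Int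
  | 0, bits, result => (bits, result)
  | fuel + 1, bits, result =>
    if outB ≤ bits then
      convertWhile value outB maxV fuel (bits - outB)
        (result ++ [PySem.Int.band (value >>> (bits - outB).toNat) maxV])
    else (bits, result)

-- one iteration of A's 'for i in range(len(data))' loop over the state (value, bits, result)
def convertStep (inB : Int) (outB : Int) (maxV : Int) (st : Int × Int × List Int) (d : Int) :
    Int × Int × List Int :=
  let value := PySem.Int.bor (st.1 <<< inB.toNat) d
  let bits := st.2.1 + inB
  let wr := convertWhile value outB maxV bits.toNat bits st.2.2
  (value, wr.1, wr.2)

-- Port of A. On the non-pad branch A either raises (excluded by Pre_) or falls through to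
-- 'return result'; the port returns result there.
def convert (data : List Int) (inBits : Int) (outBits : Int) (pad : Bool) : List Int :=
  let maxV : Int := (1 <<< outBits.toNat) - 1
  let st := data.foldl (convertStep inBits outBits maxV) (0, 0, [])
  if pad then
    if st.2.1 > 0 then st.2.2 ++ [PySem.Int.band (st.1 <<< (outBits - st.2.1).toNat) maxV]
    else st.2.2
  else st.2.2

-- ===== PORT B =====
-- B's first pass: accumulate value and record every running prefix value
def prefStep (inB : Int) (st : Int × List Int) (d : Int) : Int × List Int :=
  let v := PySem.Int.bor (st.1 <<< inB.toNat) d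
  (v, st.2 ++ [v])

-- one chunk of B: '(prefixes[i] >> ((i+1)*inBits - (j+1)*outBits)) & maxV' with the
-- closed-form source index i = -(-((j+1)*outBits) // inBits) - 1
def chunkOf (prefixes : List Int) (inB : Int) (outB : Int) (maxV : Int) (j : Int) : Int :=
  let i := -(PySem.Int.floordiv (-((j + 1) * outB)) inB) - 1
  PySem.Int.band ((PySem.List.pyGetD prefixes i 0) >>> ((i + 1) * inB - (j + 1) * outB).toNat) maxV

-- Port of B (Source B). Same epilogue note as for A: the raise paths are excluded by Pre_.
def convert_alt (data : List Int) (inBits : Int) (outBits : Int) (pad : Bool) : List Int :=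
  let acc := data.foldl (prefStep inBits) (0, [])
  let value := acc.1
  let prefixes := acc.2
  let total : Int := data.length * inBits
  let n := PySem.Int.floordiv total outBits
  let maxV : Int := (1 <<< outBits.toNat) - 1
  let result := (PySem.List.pyRange 0 n 1).map (chunkOf prefixes inBits outBits maxV)
  let r := PySem.Int.mod total outBits
  if pad then
    if r > 0 then result ++ [PySem.Int.band (value <<< (outBits - r).toNat) maxV]
    else result
  else result

-- ===== PRECONDITION & SPEC =====
-- Pre_ excludes exactly the inputs where A raises or loops forever (outBits < 0 raises at
-- '1 << outBits', outBits = 0 loops on nonempty data, negative inBits raises at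
-- 'value << inBits', and the non-pad 'Excess padding' / 'Non-zero padding' raises, stated in
-- closed form via the leftover bit count r and the last element's low r bits), plus the corner
-- outBits = 0 with empty data, where A accidentally returns [] while B's chunk-count division
-- raises ZeroDivisionError.
def Pre_convert (data : List Int) (inBits : Int) (outBits : Int) (pad : Bool) : Prop :=
  1 ≤ outBits ∧ (data = [] ∨ 0 ≤ inBits) ∧
  (pad = true ∨
    (PySem.Int.mod ((data.length : Int) * inBits) outBits < inBits ∧
     PySem.Int.mod (data.getLastD 0)
       ((1 : Int) <<< (PySem.Int.mod ((data.length : Int) * inBits) outBits).toNat) = 0))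
instance (data : List Int) (inBits : Int) (outBits : Int) (pad : Bool) : Decidable (Pre_convert data inBits outBits pad) := by unfold Pre_convert; infer_instance

def pvWitness_convert : List Int × Int × Int × Bool := ([1, 2, 3], 4, 8, true)

def Spec_convert (data : List Int) (inBits : Int) (outBits : Int) (pad : Bool) (out : List Int) : Prop := out = convert_alt data inBits outBits pad
instance (data : List Int) (inBits : Int) (outBits : Int) (pad : Bool) (out : List Int) : Decidable (Spec_convert data inBits outBits pad out) := by unfold Spec_convert; infer_instance

-- ===== CLAIM (what is proved, stated in full; the proofs are below) =====
def Claim_equal_convert : Prop := ∀ (data : List Int) (inBits : Int) (outBits : Int) (pad : Bool), Dom_convert data inBits outBits pad → Pre_convert data inBits outBits pad → Spec_convert data inBits outBits pad (convert data inBits outBits pad)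

-- ===== LEMMAS AND PROOFS =====

-- A's while loop, run to completion: it leaves bits % outB and appends the ⌊bits/outB⌋ chunks
theorem convertWhile_eq (value outB maxV : Int) (hout : 1 ≤ outB) :
    ∀ (fuel : Nat) (bits : Int) (res : List Int), 0 ≤ bits → (bits / outB).toNat ≤ fuel →
    convertWhile value outB maxV fuel bits res =
      (bits % outB,
       res ++ (List.range ((bits / outB).toNat)).map
         (fun (t : Nat) => PySem.Int.band (value >>> (bits - ((t : Int) + 1) * outB).toNat) maxV)) := by
  intro fuel
  induction fuel with
  | zero =>
    intro bits res hb hf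
    have hd0 : 0 ≤ bits / outB := Int.ediv_nonneg hb (by omega)
    have hd : bits / outB = 0 := by omega
    have hm : bits % outB = bits := by rw [Int.emod_def, hd]; ring
    simp [convertWhile, hd, hm]
  | succ fuel ih =>
    intro bits res hb hf
    by_cases hc : outB ≤ bits
    · have hd1 : 1 ≤ bits / outB := by
        rw [Int.le_ediv_iff_mul_le (by omega)]; omega
      have hdiv : (bits - outB) / outB = bits / outB - 1 := by
        have h : bits - outB = bits + -1 * outB := by ring
        rw [h, Int.add_mul_ediv_right _ _ (by omega : outB ≠ 0)]; ring
      have hmod : (bits - outB) % outB = bits % outB := by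
        have h : bits - outB = bits + -1 * outB := by ring
        rw [h, Int.add_mul_emod_self_right]
      have hrec := ih (bits - outB)
        (res ++ [PySem.Int.band (value >>> (bits - outB).toNat) maxV])
        (by omega) (by omega)
      rw [convertWhile, if_pos hc, hrec, hmod, hdiv]
      have hrange : (bits / outB).toNat = 1 + ((bits / outB - 1).toNat) := by omega
      rw [hrange, List.range_add, List.map_append, List.map_map]
      refine Prod.ext rfl ?_
      simp only [List.append_assoc, List.range_one, List.map_cons, List.map_nil,
        List.singleton_append]
      congr 1
      norm_num
      intro a _
      have h : bits - outB - ((a : Int) + 1) * outB = bits - (1 + (a : Int) + 1) * outB := by ring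
      rw [h]
    · have hd : bits / outB = 0 := Int.ediv_eq_zero_of_lt hb (by omega)
      have hm : bits % outB = bits := Int.emod_eq_of_lt hb (by omega)
      rw [convertWhile, if_neg hc, hd, hm]
      simp

theorem pref_len (inB : Int) : ∀ (xs : List Int) (st : Int × List Int),
    ((xs.foldl (prefStep inB) st).2).length = st.2.length + xs.length := by
  intro xs
  induction xs with
  | nil => intro st; simp
  | cons x xs ih =>
    intro st
    rw [List.foldl_cons, ih]
    simp [prefStep]
    omega

theorem ceil_eq (a b q : Int) (hb : 0 < b) (h1 : (q - 1) * b < a) (h2 : a ≤ q * b) :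
    -(PySem.Int.floordiv (-a) b) = q :=
  (PySem.Int.neg_floordiv_neg_eq_iff_of_pos hb).mpr ⟨h1, h2⟩

theorem ceil_spec (a b : Int) (hb : 0 < b) :
    (-(PySem.Int.floordiv (-a) b) - 1) * b < a ∧ a ≤ -(PySem.Int.floordiv (-a) b) * b := by
  have h := (PySem.Int.neg_floordiv_neg_eq_iff_of_pos (a := a) hb).mp rfl
  constructor
  · have := h.1; linarith [this]
  · exact h.2

theorem pyGetD_append_left (xs ys : List Int) (i : Int) (d : Int) (h0 : 0 ≤ i)
    (h1 : i < xs.length) :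
    PySem.List.pyGetD (xs ++ ys) i d = PySem.List.pyGetD xs i d := by
  rw [PySem.List.pyGetD_eq_getElem (xs ++ ys) d h0 (by simp; omega),
      PySem.List.pyGetD_eq_getElem xs d h0 (by exact_mod_cast h1)]
  exact List.getElem_append_left (by omega)

theorem pyGetD_append_singleton (xs : List Int) (x d : Int) :
    PySem.List.pyGetD (xs ++ [x]) (xs.length : Int) d = x := by
  rw [PySem.List.pyGetD_eq_getElem (xs ++ [x]) d (by positivity) (by simp)]
  simp

-- the loop invariant: A's interleaved fold equals B's value, B's leftover-bit count and
-- B's closed-form chunk list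
set_option maxHeartbeats 1000000 in
theorem convert_loop_eq (inB outB maxV : Int) (hin : 0 ≤ inB) (hout : 1 ≤ outB)
    (data : List Int) :
    data.foldl (convertStep inB outB maxV) (0, 0, []) =
      ((data.foldl (prefStep inB) (0, [])).1,
       ((data.length : Int) * inB) % outB,
       (List.range ((((data.length : Int) * inB) / outB).toNat)).map
         (fun (j : Nat) => chunkOf (data.foldl (prefStep inB) (0, [])).2 inB outB maxV (j : Int))) := by
  induction data using List.reverseRecOn with
  | nil => simp
  | append_singleton xs d ih =>
    have hPlen : ((xs.foldl (prefStep inB) (0, [])).2).length = xs.length := by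
      simpa using pref_len inB xs (0, [])
    set V : Int := (xs.foldl (prefStep inB) (0, [])).1 with hV
    set P : List Int := (xs.foldl (prefStep inB) (0, [])).2 with hP
    set L : Int := (xs.length : Int) with hL
    have hL0 : 0 ≤ L := by positivity
    set q : Int := (L * inB) / outB with hq
    set r : Int := (L * inB) % outB with hr
    have hr0 : 0 ≤ r := Int.emod_nonneg _ (by omega)
    have hrlt : r < outB := Int.emod_lt_of_pos _ (by omega)
    have hq0 : 0 ≤ q := Int.ediv_nonneg (by positivity) (by omega)
    have hqr : outB * q + r = L * inB := Int.ediv_add_emod _ _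
    set v' : Int := PySem.Int.bor (V <<< inB.toNat) d with hv'
    set bits : Int := r + inB with hbits
    have hbits0 : 0 ≤ bits := by omega
    set k : Int := bits / outB with hk
    have hk0 : 0 ≤ k := Int.ediv_nonneg hbits0 (by omega)
    have hkb : k * outB ≤ bits := Int.ediv_mul_le bits (by omega)
    have hkup : bits < (k + 1) * outB := Int.lt_ediv_add_one_mul_self bits (by omega)
    have hLen' : ((xs ++ [d]).length : Int) = L + 1 := by simp [hL]
    have htot : (L + 1) * inB = bits + outB * q := by linarith [hqr]
    have hmod' : ((L + 1) * inB) % outB = bits % outB := by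
      rw [htot, Int.add_mul_emod_self_left]
    have hdiv' : ((L + 1) * inB) / outB = k + q := by
      rw [htot, Int.add_mul_ediv_left _ _ (by omega : outB ≠ 0), hk]
    -- the prefix fold over xs ++ [d]
    have hsplit : List.foldl (prefStep inB) (0, []) xs = (V, P) := by
      rw [hV, hP]
    have hpref : (xs ++ [d]).foldl (prefStep inB) (0, []) = (v', P ++ [v']) := by
      rw [List.foldl_append, hsplit]
      simp only [List.foldl_cons, List.foldl_nil, prefStep]
      rw [hv']
    -- the A-side fold over xs ++ [d]
    rw [List.foldl_append, ih]
    simp only [List.foldl_cons, List.foldl_nil]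
    rw [hpref]
    have hfuel : (bits / outB).toNat ≤ bits.toNat := by
      have h1 : bits / outB ≤ bits := Int.ediv_le_self _ hbits0
      omega
    have hstep : convertStep inB outB maxV
        (V, r, (List.range (q.toNat)).map (fun (j : Nat) => chunkOf P inB outB maxV (j : Int))) d =
        (v', bits % outB,
          (List.range (q.toNat)).map (fun (j : Nat) => chunkOf P inB outB maxV (j : Int)) ++
          (List.range (k.toNat)).map
            (fun (t : Nat) => PySem.Int.band (v' >>> (bits - ((t : Int) + 1) * outB).toNat) maxV)) := by
      simp only [convertStep]
      rw [convertWhile_eq v' outB maxV hout bits.toNat bits _ hbits0 hfuel]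
    rw [hstep, hLen', hmod', hdiv']
    refine Prod.ext rfl (Prod.ext rfl ?_)
    simp only
    have hrange : (k + q).toNat = q.toNat + k.toNat := by omega
    rw [hrange, List.range_add, List.map_append]
    congr 1
    · -- old chunks are unchanged by appending v' to the prefix list
      apply List.map_congr_left
      intro j hj
      have hjq : (j : Int) < q := by
        have := List.mem_range.mp hj
        omega
      have hj0 : (0 : Int) ≤ (j : Int) := by positivity
      -- some chunk exists, so inB ≥ 1
      have hinB1 : 1 ≤ inB := by
        rcases (by omega : inB = 0 ∨ 1 ≤ inB) with h0 | h1
        · exfalso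
          have : L * inB = 0 := by rw [h0]; ring
          have hq' : q = 0 := by rw [hq, this]; simp
          omega
        · exact h1
      simp only [chunkOf]
      set Q : Int := -(PySem.Int.floordiv (-(((j : Int) + 1) * outB)) inB) with hQ
      have hspec := ceil_spec (((j : Int) + 1) * outB) inB (by omega)
      rw [← hQ] at hspec
      have ha1 : outB ≤ ((j : Int) + 1) * outB := by nlinarith
      have haq : ((j : Int) + 1) * outB ≤ q * outB := by nlinarith
      have hQ1 : 1 ≤ Q := by nlinarith [hspec.2]
      have hQL : Q ≤ L := by
        have h1 : (Q - 1) * inB < L * inB := by nlinarith [hspec.1, hqr]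
        nlinarith
      rw [pyGetD_append_left P [v'] (Q - 1) 0 (by omega) (by rw [hPlen]; omega)]
    · -- the newly emitted chunks are exactly B's chunks q, q+1, …, q+k-1
      rw [List.map_map]
      apply List.map_congr_left
      intro t ht
      have htk : (t : Int) < k := by
        have := List.mem_range.mp ht
        omega
      have ht0 : (0 : Int) ≤ (t : Int) := by positivity
      have hinB1 : 1 ≤ inB := by
        have hkpos : 1 ≤ k := by omega
        have : outB ≤ bits := by nlinarith
        omega
      have hcast : ((q.toNat + t : Nat) : Int) = q + (t : Int) := by push_cast; omega
      simp only [Function.comp_apply, chunkOf, hcast]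
      have hQeq : -(PySem.Int.floordiv (-(((q + (t : Int)) + 1) * outB)) inB) = L + 1 := by
        apply ceil_eq _ _ _ (by omega)
        · have : outB * q + outB ≤ (q + (t : Int) + 1) * outB := by nlinarith
          nlinarith
        · have hup : (q + (t : Int) + 1) * outB ≤ (k + q) * outB := by nlinarith
          have hdm : (k + q) * outB ≤ (L + 1) * inB := by
            have := Int.ediv_mul_le ((L + 1) * inB) (by omega : outB ≠ 0)
            rw [hdiv'] at this
            exact this
          linarith
      rw [hQeq]
      have hgl : PySem.List.pyGetD (P ++ [v']) (L + 1 - 1) 0 = v' := by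
        have : L + 1 - 1 = ((P.length : Nat) : Int) := by rw [hPlen]; ring
        rw [this]
        exact pyGetD_append_singleton P v' 0
      rw [hgl]
      have hshift : (L + 1 - 1 + 1) * inB - (q + (t : Int) + 1) * outB
          = bits - ((t : Int) + 1) * outB := by
        linarith [hqr]
      rw [hshift]

theorem convert_eq_alt (data : List Int) (inBits outBits : Int) (pad : Bool)
    (hout : 1 ≤ outBits) (hdata : data = [] ∨ 0 ≤ inBits) :
    convert data inBits outBits pad = convert_alt data inBits outBits pad := by
  have hmodeq : PySem.Int.mod ((data.length : Int) * inBits) outBits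
      = ((data.length : Int) * inBits) % outBits := PySem.Int.mod_eq_emod_of_pos (by omega)
  have hdiveq : PySem.Int.floordiv ((data.length : Int) * inBits) outBits
      = ((data.length : Int) * inBits) / outBits := PySem.Int.floordiv_eq_ediv_of_pos (by omega)
  rcases hdata with rfl | hin
  · simp [convert, convert_alt, PySem.Int.mod_eq_emod_of_pos (by omega : (0:Int) < outBits),
      PySem.Int.floordiv_eq_ediv_of_pos (by omega : (0:Int) < outBits)]
  · simp only [convert, convert_alt]
    rw [convert_loop_eq inBits outBits _ hin hout data]
    simp only [hmodeq, hdiveq]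
    have hmap : (PySem.List.pyRange 0 (((data.length : Int) * inBits) / outBits) 1).map
        (chunkOf (data.foldl (prefStep inBits) (0, [])).2 inBits outBits
          ((1 <<< outBits.toNat) - 1)) =
        (List.range ((((data.length : Int) * inBits) / outBits).toNat)).map
          (fun (j : Nat) => chunkOf (data.foldl (prefStep inBits) (0, [])).2 inBits outBits
            ((1 <<< outBits.toNat) - 1) (j : Int)) := by
      rw [PySem.List.pyRange_one, List.map_map]
      simp
    rw [hmap]

-- ===== VERDICT (by name: the statement is the Claim_ definition above) =====
theorem convert_spec : Claim_equal_convert := by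
  intro data inBits outBits pad _hdom hpre
  exact convert_eq_alt data inBits outBits pad hpre.1 hpre.2.1
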